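-- pv_equiv track=rewrite | github.com/rhinophylla/BiologyFinder | src/biologyfinder_fxn.py | create_binary_feature_vectors
-- ===== SOURCE A (Python) =====
-- def create_binary_feature_vectors(biologist_cited_papers_dict, paper_features_list):
--     """Builds a set of feature vectors for each biologist (key) in the biologist_cited_papers_dict by looking to see if each paper in the paper_feature_list is cited by the biologist (a list of cited papers is the value associated with each biologist key).  Adds a one to the feature vector if the paper is cited and a 0 if it is not.
--
--     Arguments:
--     biologist_cited_papers_dict - dict; keys are biologist's names (str) and the values are a list of paper IDs cited in papers authored by the biologist paper_features_list - list; list of all the papers cited by every author in the starting dict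
--
--     Returns:
--     all_binary_feature_vectors - list of lists; lists of 1s and 0s that indicate if a biologist cited a paper in the paper_features_list or not
--     """
--     all_binary_feature_vectors = []
--     for key, value in biologist_cited_papers_dict.items():
--         biologist_vector = []
--         for paper in paper_features_list:
--             if paper in value:
--                 biologist_vector.append(1)
--             else:
--                 biologist_vector.append(0)
--         all_binary_feature_vectors.append(biologist_vector)
--     return all_binary_feature_vectors
-- ===== SOURCE B (Python) =====
-- def create_binary_feature_vectors(biologist_cited_papers_dict, paper_features_list):
--     positions = {}
--     for i, paper in enumerate(paper_features_list):
--         positions.setdefault(paper, []).append(i)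
--     all_binary_feature_vectors = []
--     for value in biologist_cited_papers_dict.values():
--         vector = [0] * len(paper_features_list)
--         for paper in value:
--             for i in positions.get(paper, []):
--                 vector[i] = 1
--         all_binary_feature_vectors.append(vector)
--     return all_binary_feature_vectors
-- ===== Notes on version B (the rewrite author's own statement) =====
-- stated objective: alternative
-- what changed: Instead of rescanning the whole feature list and testing list membership per biologist, B precomputes one dict mapping each paper to all its positions, then fills a zero-filled vector by setting the recorded positions of each cited paper.
import Mathlib
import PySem

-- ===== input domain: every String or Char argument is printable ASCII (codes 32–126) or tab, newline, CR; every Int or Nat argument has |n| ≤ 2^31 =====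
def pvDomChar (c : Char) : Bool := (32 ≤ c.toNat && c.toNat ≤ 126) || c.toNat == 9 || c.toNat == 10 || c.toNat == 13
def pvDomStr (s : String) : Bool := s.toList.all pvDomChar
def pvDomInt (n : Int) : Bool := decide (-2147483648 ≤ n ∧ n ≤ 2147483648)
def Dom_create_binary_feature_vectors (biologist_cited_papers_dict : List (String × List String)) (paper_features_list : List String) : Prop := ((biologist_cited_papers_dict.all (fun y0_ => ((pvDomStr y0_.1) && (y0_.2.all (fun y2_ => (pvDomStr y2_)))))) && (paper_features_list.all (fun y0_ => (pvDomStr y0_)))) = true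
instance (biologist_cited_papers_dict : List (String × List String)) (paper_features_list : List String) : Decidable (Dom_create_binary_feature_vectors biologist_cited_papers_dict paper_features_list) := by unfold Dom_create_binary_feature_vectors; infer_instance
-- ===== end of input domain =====

-- B replaces A's per-biologist full rescan with membership tests by a single precomputed
-- paper→positions index and zero-vector filling (objective: alternative algorithm).


-- ===== PORT A =====
def create_binary_feature_vectors (biologist_cited_papers_dict : List (String × List String)) (paper_features_list : List String) : List (List Int) :=
  -- for key, value in d.items(): inner loop appends 1/0 per paper of the feature list
  biologist_cited_papers_dict.foldl
    (fun all kv =>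
      all ++ [paper_features_list.foldl
        (fun bv paper => bv ++ [if kv.2.contains paper then (1 : Int) else 0]) []])
    []

-- ===== PORT B =====
-- positions.setdefault(paper, []).append(i)  ==  positions[paper] = positions.get(paper, []) + [i]
def pvPositions (paper_features_list : List String) : PySem.Dict String (List Int) :=
  (PySem.List.enumerate paper_features_list 0).foldl
    (fun d ip => d.modify ip.2 [] (fun l => l ++ [ip.1])) PySem.Dict.empty

-- 'vector[i] = 1' for each recorded index of one cited paper (indices are in range and ≥ 0)
def pvSetOnes (vec : List Int) (idxs : List Int) : List Int :=
  idxs.foldl (fun v i => PySem.List.pySetD v i 1) vec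

def create_binary_feature_vectors_alt (biologist_cited_papers_dict : List (String × List String)) (paper_features_list : List String) : List (List Int) :=
  let positions := pvPositions paper_features_list
  biologist_cited_papers_dict.foldl
    (fun all kv =>
      all ++ [kv.2.foldl (fun vec paper => pvSetOnes vec (positions.getD paper []))
        (List.replicate paper_features_list.length 0)])
    []

-- ===== PRECONDITION & SPEC =====
def Spec_create_binary_feature_vectors (biologist_cited_papers_dict : List (String × List String)) (paper_features_list : List String) (out : List (List Int)) : Prop := out = create_binary_feature_vectors_alt biologist_cited_papers_dict paper_features_list
instance (biologist_cited_papers_dict : List (String × List String)) (paper_features_list : List String) (out : List (List Int)) : Decidable (Spec_create_binary_feature_vectors biologist_cited_papers_dict paper_features_list out) := by unfold Spec_create_binary_feature_vectors; infer_instance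

-- ===== CLAIM (what is proved, stated in full; the proofs are below) =====
def Claim_equal_create_binary_feature_vectors : Prop := ∀ (biologist_cited_papers_dict : List (String × List String)) (paper_features_list : List String), Dom_create_binary_feature_vectors biologist_cited_papers_dict paper_features_list → Spec_create_binary_feature_vectors biologist_cited_papers_dict paper_features_list (create_binary_feature_vectors biologist_cited_papers_dict paper_features_list)

-- ===== LEMMAS AND PROOFS =====

-- generic append-accumulator fold is a map
theorem pv_foldl_push {α β : Type} (f : α → β) (l : List α) :
    ∀ (init : List β), l.foldl (fun acc x => acc ++ [f x]) init = init ++ l.map f := by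
  induction l with
  | nil => intro init; simp
  | cons x t ih => intro init; simp [List.foldl, ih]

-- the positions dict read back: positions[p] lists the indices of the occurrences of p
theorem pvPositions_getD_aux (l : List (Int × String)) :
    ∀ (d : PySem.Dict String (List Int)) (p : String),
      ((l.foldl (fun d ip => d.modify ip.2 [] (fun l => l ++ [ip.1])) d).getD p [])
        = d.getD p [] ++ (l.filter (fun ip => ip.2 == p)).map (·.1) := by
  induction l with
  | nil => intro d p; simp
  | cons ip t ih =>
    intro d p
    simp only [List.foldl, ih, List.filter, List.map]
    by_cases h : ip.2 = p
    · simp [h, PySem.Dict.getD_modify]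
    · have h' : (ip.2 == p) = false := by simp [h]
      simp [h', PySem.Dict.getD_modify, Ne.symm h]

theorem pvPositions_getD (fl : List String) (p : String) :
    (pvPositions fl).getD p []
      = ((PySem.List.enumerate fl 0).filter (fun ip => ip.2 == p)).map (·.1) := by
  simpa using pvPositions_getD_aux (PySem.List.enumerate fl 0) PySem.Dict.empty p

theorem pvPositions_mem (fl : List String) (p : String) (i : Int) :
    i ∈ (pvPositions fl).getD p []
      ↔ ∃ (k : Nat) (h : k < fl.length), i = (k : Int) ∧ fl[k] = p := by
  rw [pvPositions_getD]
  simp only [List.mem_map, List.mem_filter]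
  constructor
  · rintro ⟨ip, ⟨hmem, hp⟩, hi⟩
    rcases (PySem.List.mem_enumerate_iff _ _ _).1 hmem with ⟨k, hk, rfl⟩
    exact ⟨k, hk, by simpa using hi.symm, by simpa using hp⟩
  · rintro ⟨k, hk, rfl, hp⟩
    refine ⟨((k : Int), fl[k]), ⟨?_, by simpa using hp⟩, rfl⟩
    exact (PySem.List.mem_enumerate_iff _ _ _).2 ⟨k, hk, by simp⟩

theorem pvSetOnes_length (idxs : List Int) : ∀ (vec : List Int),
    (pvSetOnes vec idxs).length = vec.length := by
  induction idxs with
  | nil => intro vec; rfl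
  | cons i t ih => intro vec; simp [pvSetOnes, List.foldl] at ih ⊢; simp [ih, PySem.List.length_pySetD]

theorem pvSetOnes_get? (idxs : List Int) (hnn : ∀ i ∈ idxs, 0 ≤ i) :
    ∀ (vec : List Int) (j : Nat),
      (pvSetOnes vec idxs)[j]? = if (j : Int) ∈ idxs ∧ j < vec.length then some 1 else vec[j]? := by
  induction idxs with
  | nil => intro vec j; simp [pvSetOnes]
  | cons i t ih =>
    intro vec j
    have hi : 0 ≤ i := hnn i (by simp)
    have step : pvSetOnes vec (i :: t) = pvSetOnes (vec.set i.toNat 1) t := by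
      simp only [pvSetOnes, List.foldl, PySem.List.pySetD_of_nonneg vec (1 : Int) hi]
    rw [step, ih (fun x hx => hnn x (List.mem_cons_of_mem _ hx)) (vec.set i.toNat 1) j,
        List.length_set]
    by_cases hjlen : j < vec.length
    · by_cases hjt : (j : Int) ∈ t
      · simp [hjt, hjlen, List.mem_cons]
      · by_cases hji : (j : Int) = i
        · have h1 : i.toNat = j := by omega
          rw [if_neg (fun hc => hjt hc.1), h1, List.getElem?_set_self hjlen,
              if_pos ⟨List.mem_cons.mpr (Or.inl hji), hjlen⟩]
        · have h2 : i.toNat ≠ j := by omega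
          rw [if_neg (by tauto), List.getElem?_set_ne h2,
              if_neg (by simp [List.mem_cons, hji, hjt])]
    · have hnone : vec[j]? = none := List.getElem?_eq_none (Nat.le_of_not_lt hjlen)
      have hnone2 : (vec.set i.toNat 1)[j]? = none :=
        List.getElem?_eq_none (by simpa using Nat.le_of_not_lt hjlen)
      simp [hjlen, hnone2, hnone]

-- the whole cited-papers loop, element by element
theorem pv_inner_get? (fl : List String) (v : List String) :
    ∀ (vec : List Int) (j : Nat), vec.length = fl.length →
      (v.foldl (fun w paper => pvSetOnes w ((pvPositions fl).getD paper [])) vec)[j]?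
        = if (∃ (h : j < fl.length), fl[j] ∈ v) then some 1 else vec[j]? := by
  induction v with
  | nil => intro vec j _; simp
  | cons p t ih =>
    intro vec j hlen
    have hnn : ∀ i ∈ (pvPositions fl).getD p [], 0 ≤ i := by
      intro i hi
      rcases (pvPositions_mem fl p i).1 hi with ⟨k, _, rfl, _⟩
      positivity
    have hlen' : (pvSetOnes vec ((pvPositions fl).getD p [])).length = fl.length := by
      rw [pvSetOnes_length]; exact hlen
    simp only [List.foldl]
    rw [ih _ j hlen', pvSetOnes_get? _ hnn vec j]
    have hmem : ((j : Int) ∈ (pvPositions fl).getD p []) ↔ (∃ (h : j < fl.length), fl[j] = p) := by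
      rw [pvPositions_mem]
      constructor
      · rintro ⟨k, hk, hkj, hp⟩
        have : k = j := by omega
        exact ⟨this ▸ hk, this ▸ hp⟩
      · rintro ⟨h, hp⟩; exact ⟨j, h, rfl, hp⟩
    by_cases hjl : j < fl.length
    · by_cases hp : fl[j] = p
      · simp [hjl, hp, hmem, hlen]
      · have : ((j:Int) ∈ (pvPositions fl).getD p []) ↔ False := by simp [hmem, hjl, hp]
        by_cases ht : fl[j] ∈ t <;> simp [hjl, hp, ht, this]
    · have hnm : ¬ ((j : Int) ∈ (pvPositions fl).getD p []) := by
        intro hmm; rcases hmem.1 hmm with ⟨h, _⟩; exact hjl h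
      simp [hjl, hnm]

theorem pv_inner_eq (fl : List String) (v : List String) :
    (v.foldl (fun w paper => pvSetOnes w ((pvPositions fl).getD paper []))
        (List.replicate fl.length 0))
      = fl.map (fun paper => if v.contains paper then (1 : Int) else 0) := by
  apply List.ext_getElem?
  intro j
  rw [pv_inner_get? fl v (List.replicate fl.length 0) j (by simp)]
  by_cases hj : j < fl.length
  · by_cases hv : fl[j] ∈ v
    · simp [hj, hv, List.getElem?_map, List.getElem?_eq_getElem hj]
    · have : fl[j] ∈ v ↔ False := by simp [hv]
      simp [hj, hv, List.getElem?_map, List.getElem?_eq_getElem hj, List.getElem?_replicate]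
  · have hle : fl.length ≤ j := Nat.le_of_not_lt hj
    simp [hj, List.getElem?_eq_none_iff, hle]

-- ===== VERDICT (by name: the statement is the Claim_ definition above) =====
theorem create_binary_feature_vectors_spec : Claim_equal_create_binary_feature_vectors := by
  intro d fl _
  unfold Spec_create_binary_feature_vectors create_binary_feature_vectors create_binary_feature_vectors_alt
  rw [pv_foldl_push (fun kv : String × List String =>
        fl.foldl (fun bv paper => bv ++ [if kv.2.contains paper then (1 : Int) else 0]) []) d [],
      pv_foldl_push (fun kv : String × List String =>
        kv.2.foldl (fun vec paper => pvSetOnes vec ((pvPositions fl).getD paper []))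
          (List.replicate fl.length 0)) d []]
  simp only [List.nil_append]
  apply List.map_congr_left
  intro kv _
  rw [pv_inner_eq fl kv.2, pv_foldl_push (fun paper => if kv.2.contains paper then (1 : Int) else 0) fl []]
  simp
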